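-- pv_equiv track=rewrite | github.com/ricea/yizhen-step-repo | week2/blocry.py | solution
-- ===== SOURCE A (Python) =====
-- def solution(s: str) -> int:
--     '''
--     input:
--     GGWW
--     GWWGGWGWG
--     find min number of change (G->W or W->G)to make to convert the string into all G are in left side and all W are in right side
--     better solution:
--     use a spliting line and sliding through the string (O(N))
--     the line represent:
--     in the left of the line, all W should be convert to G
--     in the right of the line, all G should be convert to W
--     '''
--     if len(s) <= 1:
--         return 0
--     length = len(s)
--     # O(N) to count G
--     count = s.count('G')
--     ans = count
--     # initial situations: line is in left most, so all the G should be changed to W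
--     line = 0
--     # slide the line into right
--     while line < length:
--         # each step would put current char into left side
--         current_char = s[line]
--         if s[line] == 'G':
--             count -= 1
--             ans = min(ans, count)
--         else:
--             count += 1
--         line += 1
--     return ans
-- ===== SOURCE B (Python) =====
-- def solution(s: str) -> int:
--     # prefix-count table + closed-form cost per split position
--     prefixG = [0]
--     for c in s:
--         prefixG.append(prefixG[-1] + (1 if c == 'G' else 0))
--     totalG = prefixG[-1]
--     costs = [i + totalG - 2 * p for i, p in enumerate(prefixG)]
--     return min(costs)
-- ===== Notes on version B (the rewrite author's own statement) =====
-- stated objective: alternative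
-- what changed: Replaces A's sliding-line loop that updates a running count and min in one stateful pass by a two-pass table-then-scan decomposition: build a prefix-G-count table, then compute each split's cost by the closed form i + totalG - 2*prefixG[i] and take the min.
import Mathlib
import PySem

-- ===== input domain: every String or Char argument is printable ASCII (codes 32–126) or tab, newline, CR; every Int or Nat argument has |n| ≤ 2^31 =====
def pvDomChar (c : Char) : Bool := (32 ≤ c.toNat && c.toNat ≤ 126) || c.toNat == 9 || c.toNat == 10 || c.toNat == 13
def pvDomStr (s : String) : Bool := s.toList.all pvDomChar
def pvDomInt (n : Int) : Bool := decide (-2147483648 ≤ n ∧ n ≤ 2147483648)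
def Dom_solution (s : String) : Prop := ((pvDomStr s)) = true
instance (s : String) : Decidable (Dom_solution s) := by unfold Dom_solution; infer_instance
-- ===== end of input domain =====

-- B replaces A's sliding-counter loop by a prefix-count table plus a closed-form
-- cost per split position; objective: alternative decomposition (same O(n) cost).

-- ===== PORT A =====
-- A: guard len<=1; count G; slide a line left→right keeping (count, ans).
def solution (s : String) : Int :=
  if PySem.Str.len s ≤ 1 then 0
  else
    let length : Int := PySem.Str.len s
    let count : Int := (PySem.Str.count s "G" : Int)
    -- while line < length: s[line] is always in range, ported with pyGetD
    let st := (PySem.List.pyRange 0 length).foldl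
      (fun (st : Int × Int) line =>
        if PySem.List.pyGetD s.toList line ' ' = 'G' then
          (st.1 - 1, min st.2 (st.1 - 1))
        else
          (st.1 + 1, st.2))
      (count, count)
    st.2

-- ===== PORT B =====
-- B helper: the prefixG table built front-to-back (Source B's append loop)
def prefixesB (cs : List Char) (acc : Int) : List Int :=
  match cs with
  | [] => [acc]
  | c :: t => acc :: prefixesB t (acc + (if c = 'G' then 1 else 0))

def solution_alt (s : String) : Int :=
  let prefixG := prefixesB s.toList 0
  let totalG := PySem.List.pyGetD prefixG (-1) 0
  let costs := (PySem.List.enumerate prefixG).map (fun p => p.1 + totalG - 2 * p.2)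
  -- min(costs): costs is never empty, so Python's min returns
  (PySem.List.min? costs (fun x => x)).getD 0

-- ===== PRECONDITION & SPEC =====
def Spec_solution (s : String) (out : Int) : Prop := out = solution_alt s
instance (s : String) (out : Int) : Decidable (Spec_solution s out) := by unfold Spec_solution; infer_instance

-- ===== CLAIM (what is proved, stated in full; the proofs are below) =====
def Claim_equal_solution : Prop := ∀ (s : String), Dom_solution s → Spec_solution s (solution s)

-- ===== LEMMAS AND PROOFS =====

-- cost change when one more char moves to the left of the line
def stepc (c : Char) : Int := if c = 'G' then -1 else 1

-- minimum over all split positions (walk of costs), recursively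
def Mall : List Char → Int → Int
  | [], a => a
  | c :: t, a => min a (Mall t (a + stepc c))

-- the list of all split costs, starting value a
def walk : List Char → Int → List Int
  | [], a => [a]
  | c :: t, a => a :: walk t (a + stepc c)

lemma Mall_le (cs : List Char) (a : Int) : Mall cs a ≤ a := by
  cases cs with
  | nil => simp [Mall]
  | cons c t => simp [Mall]

lemma count_go_singleton (c : Char) (l : List Char) :
    ∀ (fuel acc : Nat), l.length ≤ fuel →
      PySem.Chars.count.go [c] fuel l acc = acc + l.count c := by
  induction l with
  | nil =>
    intro fuel acc _
    cases fuel <;> simp [PySem.Chars.count.go]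
  | cons h t ih =>
    intro fuel acc hf
    cases fuel with
    | zero => simp at hf
    | succ f =>
      simp only [List.length_cons, Nat.succ_le_succ_iff] at hf
      by_cases hc : c = h
      · subst hc
        simp only [PySem.Chars.count.go, List.isPrefixOf, beq_self_eq_true,
          Bool.true_and, List.isPrefixOf_nil_left, if_true, List.length_cons,
          List.length_nil, List.drop_succ_cons, List.drop_zero]
        rw [ih f (acc + 1) hf]
        simp
        omega
      · have hpre : ([c].isPrefixOf (h :: t)) = false := by
          simp [List.isPrefixOf]
          intro hh
          exact (hc hh).elim
        have hcnt : (h == c) = false := by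
          simp
          intro hh
          exact (hc hh.symm).elim
        simp [PySem.Chars.count.go, hpre, ih f acc hf, List.count_cons, hcnt]

lemma str_count_G (s : String) :
    PySem.Str.count s "G" = s.toList.count 'G' := by
  rw [PySem.Str.count_eq]
  show PySem.Chars.count s.toList ['G'] = _
  unfold PySem.Chars.count
  rw [if_neg (by simp), count_go_singleton 'G' s.toList s.toList.length 0 le_rfl]
  simp

-- A's loop (over the chars) computes min b (Mall cs a) when b ≤ a
lemma foldA (cs : List Char) :
    ∀ (a b : Int), b ≤ a →
      (cs.foldl (fun (st : Int × Int) c =>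
        if c = 'G' then (st.1 - 1, min st.2 (st.1 - 1)) else (st.1 + 1, st.2))
        (a, b)).2 = min b (Mall cs a) := by
  induction cs with
  | nil => intro a b h; simp [Mall]; omega
  | cons c t ih =>
    intro a b h
    by_cases hc : c = 'G'
    · have hM := Mall_le t (a - 1)
      simp only [List.foldl_cons, hc, if_pos]
      rw [ih (a - 1) (min b (a - 1)) (by omega)]
      simp only [Mall, stepc, hc, if_true, reduceIte]
      have h1 : a + -1 = a - 1 := by ring
      rw [h1]
      simp only [min_def]
      split_ifs <;> omega
    · have hM := Mall_le t (a + 1)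
      simp only [List.foldl_cons, hc, if_false]
      rw [ih (a + 1) b (by omega)]
      simp only [Mall, stepc, if_neg hc]
      simp only [min_def]
      split_ifs <;> omega

-- the prefixG table ends in the total G count
lemma prefixesB_last (cs : List Char) :
    ∀ (p : Int), PySem.List.pyGetD (prefixesB cs p) (-1) 0
      = p + (cs.count 'G' : Int) := by
  induction cs with
  | nil =>
    intro p
    rw [prefixesB, PySem.List.pyGetD_neg_one _ _ (by simp)]
    simp
  | cons c t ih =>
    intro p
    have hne : prefixesB t (p + (if c = 'G' then 1 else 0)) ≠ [] := by
      cases t <;> simp [prefixesB]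
    rw [prefixesB, PySem.List.pyGetD_neg_one _ 0 (List.cons_ne_nil _ _),
      List.getLast_cons hne, ← PySem.List.pyGetD_neg_one _ 0 hne, ih]
    by_cases hc : c = 'G' <;> simp [hc, List.count_cons] <;> omega

-- enumerated, cost-mapped prefix table = walk of costs
lemma costs_eq_walk (cs : List Char) :
    ∀ (k p g : Int),
      (PySem.List.enumerate (prefixesB cs p) k).map
        (fun q => q.1 + g - 2 * q.2) = walk cs (k + g - 2 * p) := by
  induction cs with
  | nil => intro k p g; simp [prefixesB, walk, PySem.List.enumerate_cons,
      PySem.List.enumerate_nil]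
  | cons c t ih =>
    intro k p g
    simp only [prefixesB, walk, PySem.List.enumerate_cons, List.map_cons, ih]
    congr 1
    by_cases hc : c = 'G' <;> simp [hc, stepc] <;> ring

lemma foldl_min_walk (cs : List Char) :
    ∀ (x a : Int), (walk cs a).foldl min x = min x (Mall cs a) := by
  induction cs with
  | nil => intro x a; simp [walk, Mall]
  | cons c t ih =>
    intro x a
    simp [walk, Mall, List.foldl_cons, ih, min_assoc]

lemma min?_walk (cs : List Char) (a : Int) :
    PySem.List.min? (walk cs a) (fun x => x) = some (Mall cs a) := by
  cases cs with
  | nil => simp [walk, PySem.List.min?_id_cons, Mall]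
  | cons c t =>
    simp only [walk, PySem.List.min?_id_cons, foldl_min_walk, Mall]

-- B computes Mall cs (count of G)
lemma alt_eq_Mall (s : String) :
    solution_alt s = Mall s.toList (s.toList.count 'G') := by
  unfold solution_alt
  dsimp only
  rw [prefixesB_last s.toList 0]
  rw [costs_eq_walk s.toList 0 0 (0 + (s.toList.count 'G' : Int))]
  rw [min?_walk]
  simp

-- A computes Mall cs (count of G) too
lemma a_eq_Mall (s : String) :
    solution s = Mall s.toList (s.toList.count 'G') := by
  unfold solution
  by_cases h : PySem.Str.len s ≤ 1
  · -- guard: length 0 or 1, where the minimum cost is 0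
    simp only [h, if_pos]
    rw [PySem.Str.len_eq] at h
    have hl : s.toList.length ≤ 1 := by exact_mod_cast h
    cases hcs : s.toList with
    | nil => simp [Mall]
    | cons c t =>
      cases t with
      | nil =>
        by_cases hc : c = 'G' <;>
          simp [Mall, stepc, hc, List.count_nil]
      | cons d u => rw [hcs] at hl; simp at hl
  · simp only [h, if_neg, not_false_iff]
    have hlen : PySem.Str.len s = PySem.List.len s.toList := by
      simp [PySem.Str.len_eq, PySem.List.len]
    rw [hlen, PySem.List.foldl_pyRange_pyGetD s.toList ' '
      (fun (st : Int × Int) c =>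
        if c = 'G' then (st.1 - 1, min st.2 (st.1 - 1)) else (st.1 + 1, st.2))
      _ le_rfl]
    simp only [Int.toNat_zero, List.drop_zero]
    rw [str_count_G, foldA s.toList _ _ le_rfl]
    have := Mall_le s.toList ((s.toList.count 'G' : Nat) : Int)
    omega

-- ===== VERDICT (by name: the statement is the Claim_ definition above) =====
theorem solution_spec : Claim_equal_solution := by
  intro s _
  unfold Spec_solution
  rw [a_eq_Mall, alt_eq_Mall]
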